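-- pv_equiv track=rewrite | github.com/redcreen/project-assistant | scripts/validate_docs_system.py | parse_current_execution_fields
-- ===== SOURCE A (Python) =====
-- def parse_current_execution_fields(plan_text: str) -> dict[str, str]:
--     fields = {"objective": "n/a", "plan_link": "n/a"}
--     in_current_execution = False
--     for raw_line in plan_text.splitlines():
--         if raw_line.startswith("## "):
--             in_current_execution = raw_line.strip() == "## Current Execution Line"
--             continue
--         if not in_current_execution:
--             continue
--         stripped = raw_line.strip()
--         if stripped.startswith("- Objective:"):
--             fields["objective"] = stripped.split(":", 1)[1].strip().strip("`")
--         elif stripped.startswith("- Plan Link:"):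
--             fields["plan_link"] = stripped.split(":", 1)[1].strip().strip("`")
--     return fields
-- ===== SOURCE B (Python) =====
-- def _field_value(stripped: str) -> str:
--     return stripped.split(":", 1)[1].strip().strip("`")
--
--
-- def parse_current_execution_fields(plan_text: str) -> dict[str, str]:
--     # First pass: group lines into (header, body) sections; lines before the
--     # first '## ' header get a None header.
--     sections = []
--     header, body = None, []
--     for line in plan_text.splitlines():
--         if line.startswith("## "):
--             sections.append((header, body))
--             header, body = line.strip(), []
--         else:
--             body.append(line)
--     sections.append((header, body))
--
--     # Second pass: scan every 'Current Execution Line' section in order,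
--     # last value wins.
--     fields = {"objective": "n/a", "plan_link": "n/a"}
--     for hdr, lines in sections:
--         if hdr != "## Current Execution Line":
--             continue
--         for line in lines:
--             stripped = line.strip()
--             if stripped.startswith("- Objective:"):
--                 fields["objective"] = _field_value(stripped)
--             elif stripped.startswith("- Plan Link:"):
--                 fields["plan_link"] = _field_value(stripped)
--     return fields
-- ===== Notes on version B (the rewrite author's own statement) =====
-- stated objective: alternative
-- what changed: B replaces A's single stateful flag-carrying loop by a two-phase decomposition: it first groups the lines into (header, body) sections, then folds over the bodies of every matching section in order so the last value still wins.
import Mathlib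
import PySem

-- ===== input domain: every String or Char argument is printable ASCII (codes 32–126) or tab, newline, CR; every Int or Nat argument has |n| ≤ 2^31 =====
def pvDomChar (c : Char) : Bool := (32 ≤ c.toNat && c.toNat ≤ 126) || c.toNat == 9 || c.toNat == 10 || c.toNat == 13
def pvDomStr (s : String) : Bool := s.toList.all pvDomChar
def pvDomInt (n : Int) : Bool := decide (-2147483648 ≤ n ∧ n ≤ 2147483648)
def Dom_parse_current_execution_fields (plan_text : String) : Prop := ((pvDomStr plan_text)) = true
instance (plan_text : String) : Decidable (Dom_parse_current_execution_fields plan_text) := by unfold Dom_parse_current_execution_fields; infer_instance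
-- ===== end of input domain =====

-- B restructures A's single flag-carrying loop into a two-phase pass (group lines into sections, then fold over the matching sections); return value only, no mutation.

-- ===== PORT A =====
-- stripped.split(":", 1)[1].strip().strip("`") is inlined below; the [1] is guarded by the startswith check, so index 1 exists
def pcefStepA (st : Bool × PySem.Dict String String) (raw_line : String) :
    Bool × PySem.Dict String String :=
  if PySem.Str.startswith raw_line "## " then
    (PySem.Str.strip raw_line == "## Current Execution Line", st.2)
  else if !st.1 then
    st
  else
    let stripped := PySem.Str.strip raw_line
    if PySem.Str.startswith stripped "- Objective:" then
      (st.1, st.2.insert "objective"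
        (PySem.Str.stripChars
          (PySem.Str.strip (((PySem.Str.splitMax? stripped ":" 1).getD []).getD 1 "")) "`"))
    else if PySem.Str.startswith stripped "- Plan Link:" then
      (st.1, st.2.insert "plan_link"
        (PySem.Str.stripChars
          (PySem.Str.strip (((PySem.Str.splitMax? stripped ":" 1).getD []).getD 1 "")) "`"))
    else st

def parse_current_execution_fields (plan_text : String) : List (String × String) :=
  (((PySem.Str.splitlines plan_text).foldl pcefStepA
      (false, (PySem.Dict.empty.insert "objective" "n/a").insert "plan_link" "n/a")).2).items

-- ===== PORT B =====
def pcefFieldValue (stripped : String) : String :=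
  PySem.Str.stripChars
    (PySem.Str.strip (((PySem.Str.splitMax? stripped ":" 1).getD []).getD 1 ""))
    "`"

-- phase 1: group lines into (header, body) sections
def pcefSections (lines : List String) :
    List (Option String × List String) :=
  let st := lines.foldl
    (fun (st : List (Option String × List String) × Option String × List String) line =>
      if PySem.Str.startswith line "## " then
        (st.1 ++ [(st.2.1, st.2.2)], some (PySem.Str.strip line), [])
      else
        (st.1, st.2.1, st.2.2 ++ [line]))
    ([], none, [])
  st.1 ++ [(st.2.1, st.2.2)]

-- phase 2: fold a section body into the fields dict
def pcefBodyStep (fields : PySem.Dict String String) (line : String) :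
    PySem.Dict String String :=
  let stripped := PySem.Str.strip line
  if PySem.Str.startswith stripped "- Objective:" then
    fields.insert "objective" (pcefFieldValue stripped)
  else if PySem.Str.startswith stripped "- Plan Link:" then
    fields.insert "plan_link" (pcefFieldValue stripped)
  else fields

def parse_current_execution_fields_alt (plan_text : String) : List (String × String) :=
  ((pcefSections (PySem.Str.splitlines plan_text)).foldl
    (fun fields sec =>
      if sec.1 == some "## Current Execution Line" then
        sec.2.foldl pcefBodyStep fields
      else fields)
    ((PySem.Dict.empty.insert "objective" "n/a").insert "plan_link" "n/a")).items

-- ===== PRECONDITION & SPEC =====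
def Spec_parse_current_execution_fields (plan_text : String) (out : List (String × String)) : Prop := out = parse_current_execution_fields_alt plan_text
instance (plan_text : String) (out : List (String × String)) : Decidable (Spec_parse_current_execution_fields plan_text out) := by unfold Spec_parse_current_execution_fields; infer_instance

-- ===== CLAIM (what is proved, stated in full; the proofs are below) =====
def Claim_equal_parse_current_execution_fields : Prop := ∀ (plan_text : String), Dom_parse_current_execution_fields plan_text → Spec_parse_current_execution_fields plan_text (parse_current_execution_fields plan_text)

-- ===== LEMMAS AND PROOFS =====

-- recursive characterisation of pcefSections, convenient for induction
def pcefSectionsFrom : List String → Option String → List String →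
    List (Option String × List String)
  | [], h, b => [(h, b)]
  | l :: ls, h, b =>
    if PySem.Str.startswith l "## " then
      (h, b) :: pcefSectionsFrom ls (some (PySem.Str.strip l)) []
    else
      pcefSectionsFrom ls h (b ++ [l])

def pcefProcSec (d : PySem.Dict String String) (sec : Option String × List String) :
    PySem.Dict String String :=
  if sec.1 == some "## Current Execution Line" then sec.2.foldl pcefBodyStep d else d

def pcefFold (lines : List String)
    (st : List (Option String × List String) × Option String × List String) :
    List (Option String × List String) × Option String × List String :=
  lines.foldl
    (fun st line =>
      if PySem.Str.startswith line "## " then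
        (st.1 ++ [(st.2.1, st.2.2)], some (PySem.Str.strip line), [])
      else
        (st.1, st.2.1, st.2.2 ++ [line]))
    st

lemma pcefSections_eq_from (lines : List String) (secs : List (Option String × List String))
    (h : Option String) (b : List String) :
    (pcefFold lines (secs, h, b)).1 ++
        [((pcefFold lines (secs, h, b)).2.1, (pcefFold lines (secs, h, b)).2.2)] =
      secs ++ pcefSectionsFrom lines h b := by
  induction lines generalizing secs h b with
  | nil => simp [pcefFold, pcefSectionsFrom]
  | cons l ls ih =>
    by_cases hl : PySem.Str.startswith l "## "
    · simp only [pcefFold, List.foldl_cons, hl, if_pos, pcefSectionsFrom]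
      rw [show (List.foldl _ _ ls) = pcefFold ls (secs ++ [(h, b)], some (PySem.Str.strip l), []) from rfl]
      rw [ih]
      simp
    · simp only [pcefFold, List.foldl_cons, hl, Bool.false_eq_true, if_neg, not_false_eq_true,
        pcefSectionsFrom]
      rw [show (List.foldl _ _ ls) = pcefFold ls (secs, h, b ++ [l]) from rfl]
      rw [ih]

lemma pcefSections_eq (lines : List String) :
    pcefSections lines = pcefSectionsFrom lines none [] := by
  have := pcefSections_eq_from lines [] none []
  simpa [pcefSections, pcefFold] using this

lemma pcefMain (lines : List String) (h : Option String) (b : List String)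
    (d : PySem.Dict String String) :
    (pcefSectionsFrom lines h b).foldl pcefProcSec d =
      (lines.foldl pcefStepA
        (h == some "## Current Execution Line", pcefProcSec d (h, b))).2 := by
  induction lines generalizing h b d with
  | nil => simp [pcefSectionsFrom, pcefProcSec]
  | cons l ls ih =>
    by_cases hl : PySem.Str.startswith l "## "
    · simp only [pcefSectionsFrom, hl, if_pos, List.foldl_cons]
      rw [ih]
      have : pcefProcSec (pcefProcSec d (h, b)) (some (PySem.Str.strip l), []) =
          pcefProcSec d (h, b) := by
        simp [pcefProcSec]
      rw [this]
      congr 1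
      simp at hl
      simp [pcefStepA, hl]
    · simp only [pcefSectionsFrom, hl, if_neg, Bool.false_eq_true, not_false_eq_true,
        List.foldl_cons]
      rw [ih]
      congr 1
      by_cases hc : h = some "## Current Execution Line"
      · subst hc
        simp only [pcefProcSec, beq_self_eq_true, if_pos, List.foldl_append, List.foldl_cons,
          List.foldl_nil, pcefStepA, hl, Bool.false_eq_true, if_neg, not_false_eq_true,
          Bool.not_true]
        simp [pcefBodyStep, pcefFieldValue]
        split_ifs <;> rfl
      · have hne : (h == some "## Current Execution Line") = false := by
          simp [hc]
        simp at hl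
        simp [pcefProcSec, hne, pcefStepA, hl]

-- ===== VERDICT (by name: the statement is the Claim_ definition above) =====
theorem parse_current_execution_fields_spec : Claim_equal_parse_current_execution_fields := by
  intro plan_text _
  unfold Spec_parse_current_execution_fields parse_current_execution_fields
    parse_current_execution_fields_alt
  rw [pcefSections_eq]
  rw [show (fun (fields : PySem.Dict String String) (sec : Option String × List String) =>
      if sec.1 == some "## Current Execution Line" then
        sec.2.foldl pcefBodyStep fields
      else fields) = pcefProcSec from rfl]
  rw [pcefMain]
  simp [pcefProcSec]
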